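-- pv_equiv track=rewrite | github.com/mikiya1130/AtCoder | library/get_nearest_index.py | get_nearest_index
-- ===== SOURCE A (Python) =====
-- def get_nearest_index(L, num):
--     idx = None
--
--     min_diff = None
--     for i, l in enumerate(L):
--         diff = abs(l - num)
--         if min_diff is None or diff < min_diff:
--             idx = i
--             min_diff = diff
--
--     return idx
-- ===== SOURCE B (Python) =====
-- def get_nearest_index(L, num):
--     if not L:
--         return None
--
--     def best(seg):
--         # seg is nonempty; returns (index within seg of the leftmost element
--         # with minimal |element - num|, that minimal difference)
--         if len(seg) == 1:
--             return 0, abs(seg[0] - num)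
--         mid = len(seg) // 2
--         i, di = best(seg[:mid])
--         j, dj = best(seg[mid:])
--         if di <= dj:
--             return i, di
--         return mid + j, dj
--
--     return best(L)[0]
-- ===== Notes on version B (the rewrite author's own statement) =====
-- stated objective: alternative
-- what changed: Replaces A's linear accumulating scan (tracking idx/min_diff across the list) by a divide-and-conquer tournament: recursively find the best index in each half and combine with a left-biased tie-break, preserving the first-occurrence rule.
import Mathlib
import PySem

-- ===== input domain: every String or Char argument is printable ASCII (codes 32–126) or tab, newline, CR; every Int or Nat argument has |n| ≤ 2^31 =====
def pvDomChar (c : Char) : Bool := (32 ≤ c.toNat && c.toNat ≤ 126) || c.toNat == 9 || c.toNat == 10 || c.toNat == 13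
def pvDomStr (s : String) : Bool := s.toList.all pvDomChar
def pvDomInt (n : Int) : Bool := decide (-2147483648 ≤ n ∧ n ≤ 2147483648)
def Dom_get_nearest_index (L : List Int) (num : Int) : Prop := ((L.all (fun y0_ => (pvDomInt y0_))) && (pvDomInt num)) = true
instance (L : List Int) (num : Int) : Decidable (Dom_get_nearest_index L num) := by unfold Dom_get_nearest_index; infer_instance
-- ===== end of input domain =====

-- B replaces A's linear accumulating scan by a divide-and-conquer tournament
-- (recursively find the best index in each half, combine left-biased) — alternative.

-- ===== PORT A =====
-- literal port of A's loop: state (idx, min_diff), both starting as None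
def get_nearest_index (L : List Int) (num : Int) : Option Int :=
  ((PySem.List.enumerate L 0).foldl
    (fun (st : Option Int × Option Int) p =>
      let diff := |p.2 - num|
      match st.2 with
      | none => (some p.1, some diff)
      | some m => if diff < m then (some p.1, some diff) else st)
    (none, none)).1

-- ===== PORT B =====
-- inner helper `best` of Source B: seg nonempty; the slices seg[:mid] / seg[mid:]
-- with 0 ≤ mid ≤ len(seg) are exactly List.take / List.drop.
-- (the [] case is unreachable from the guarded caller; it returns a dummy)
def pyBest (num : Int) : List Int → Int × Int
  | [] => (0, 0)
  | [y] => (0, |y - num|)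
  | y :: z :: t =>
      let mid := (y :: z :: t).length / 2
      let r₁ := pyBest num ((y :: z :: t).take mid)
      let r₂ := pyBest num ((y :: z :: t).drop mid)
      if r₁.2 ≤ r₂.2 then r₁ else ((mid : Int) + r₂.1, r₂.2)
  termination_by seg => seg.length
  decreasing_by
    all_goals simp [List.length_take, List.length_drop]
    all_goals omega

-- literal port of Source B: empty guard, then the tournament over the whole list
def get_nearest_index_alt (L : List Int) (num : Int) : Option Int :=
  if L = [] then none else some (pyBest num L).1

-- ===== PRECONDITION & SPEC =====
def Spec_get_nearest_index (L : List Int) (num : Int) (out : Option Int) : Prop := out = get_nearest_index_alt L num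
instance (L : List Int) (num : Int) (out : Option Int) : Decidable (Spec_get_nearest_index L num out) := by unfold Spec_get_nearest_index; infer_instance

-- ===== CLAIM (what is proved, stated in full; the proofs are below) =====
def Claim_equal_get_nearest_index : Prop := ∀ (L : List Int) (num : Int), Dom_get_nearest_index L num → Spec_get_nearest_index L num (get_nearest_index L num)

-- ===== LEMMAS AND PROOFS =====

-- minimal |l - num| over a nonempty segment (0 on [])
def mdiff (num : Int) : List Int → Int
  | [] => 0
  | y :: t => List.foldl min |y - num| (t.map (fun l => |l - num|))

theorem foldl_min_min {a b : Int} (l : List Int) :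
    List.foldl min (min a b) l = min a (List.foldl min b l) := by
  induction l generalizing b with
  | nil => simp
  | cons x t ih => simp [List.foldl, min_assoc, ih]

theorem foldl_min_le {a : Int} (l : List Int) : List.foldl min a l ≤ a := by
  induction l generalizing a with
  | nil => simp
  | cons x t ih =>
    calc List.foldl min (min a x) t ≤ min a x := ih
    _ ≤ a := min_le_left _ _

theorem foldl_min_mem {a : Int} (l : List Int) : List.foldl min a l ∈ a :: l := by
  induction l generalizing a with
  | nil => simp
  | cons x t ih =>
    rw [List.foldl_cons]
    rcases List.mem_cons.mp (ih (a := min a x)) with h | h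
    · rcases min_cases a x with ⟨he, _⟩ | ⟨he, _⟩ <;> rw [h, he] <;> simp
    · simp [h]

theorem foldl_min_le_mem {a d : Int} {l : List Int} (h : d ∈ a :: l) :
    List.foldl min a l ≤ d := by
  induction l generalizing a with
  | nil => simp at h; simp [h]
  | cons x t ih =>
    rw [List.foldl_cons]
    rcases List.mem_cons.mp h with h | h
    · subst h; exact (foldl_min_le _).trans (min_le_left _ _)
    · rcases List.mem_cons.mp h with h | h
      · subst h; exact (foldl_min_le _).trans (min_le_right _ _)
      · exact ih (List.mem_cons_of_mem _ h)

theorem mdiff_mem {num : Int} {l : List Int} (h : l ≠ []) :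
    mdiff num l ∈ l.map (fun x => |x - num|) := by
  cases l with
  | nil => exact absurd rfl h
  | cons y t => exact foldl_min_mem _

theorem mdiff_isMin {num : Int} {l : List Int} {d : Int}
    (h : d ∈ l.map (fun x => |x - num|)) : mdiff num l ≤ d := by
  cases l with
  | nil => simp at h
  | cons y t => exact foldl_min_le_mem (by simpa using h)

theorem mdiff_append {num : Int} {u v : List Int} (hu : u ≠ []) (hv : v ≠ []) :
    mdiff num (u ++ v) = min (mdiff num u) (mdiff num v) := by
  cases u with
  | nil => exact absurd rfl hu
  | cons a u' =>
    cases v with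
    | nil => exact absurd rfl hv
    | cons b v' =>
      simp only [mdiff, List.cons_append, List.map_append, List.map_cons,
        List.foldl_append, List.foldl_cons]
      rw [foldl_min_min]

-- characterization of B's tournament on a nonempty segment:
-- leftmost index of the minimal difference, and that minimum
theorem pyBest_char (num : Int) (seg : List Int) (h : seg ≠ []) :
    pyBest num seg =
      ((((seg.map (fun l => |l - num|)).idxOf (mdiff num seg) : Nat) : Int),
        mdiff num seg) := by
  induction hn : seg.length using Nat.strong_induction_on generalizing seg with
  | _ n ih =>
  match seg, h with
  | [y], _ => simp [pyBest, mdiff]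
  | y :: z :: t, _ =>
    subst hn
    rw [pyBest]
    set seg := y :: z :: t with hseg
    have hlen : 2 ≤ seg.length := by simp [hseg]
    set mid := seg.length / 2 with hmid
    have hmid1 : 1 ≤ mid := by omega
    have hmidlt : mid < seg.length := by omega
    have htake : (seg.take mid).length = mid := by simp; omega
    have hdrop : (seg.drop mid).length = seg.length - mid := by simp
    have hut : seg.take mid ≠ [] := by
      intro hc; rw [← List.length_eq_zero_iff] at hc; omega
    have hvt : seg.drop mid ≠ [] := by
      intro hc; rw [← List.length_eq_zero_iff] at hc; omega
    rw [ih (seg.take mid).length (by omega) _ hut rfl,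
        ih (seg.drop mid).length (by omega) _ hvt rfl]
    have happ : seg.take mid ++ seg.drop mid = seg := List.take_append_drop _ _
    have hmap : seg.map (fun l => |l - num|)
        = (seg.take mid).map (fun l => |l - num|) ++ (seg.drop mid).map (fun l => |l - num|) := by
      rw [← List.map_append, happ]
    have hmd : mdiff num seg = min (mdiff num (seg.take mid)) (mdiff num (seg.drop mid)) := by
      conv_lhs => rw [← happ]
      exact mdiff_append hut hvt
    by_cases hle : mdiff num (seg.take mid) ≤ mdiff num (seg.drop mid)
    · rw [if_pos hle]
      have hm : mdiff num seg = mdiff num (seg.take mid) := by rw [hmd, min_eq_left hle]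
      rw [hm, hmap, List.idxOf_append_of_mem (mdiff_mem hut)]
    · rw [if_neg hle]
      rw [not_le] at hle
      have hm : mdiff num seg = mdiff num (seg.drop mid) := by
        rw [hmd, min_eq_right (le_of_lt hle)]
      have hnotmem : mdiff num seg ∉ (seg.take mid).map (fun l => |l - num|) := by
        intro hc
        have := mdiff_isMin (l := seg.take mid) hc
        omega
      rw [hm] at hnotmem ⊢
      rw [hmap, List.idxOf_append, if_neg hnotmem]
      simp only [List.length_map, htake, Prod.mk.injEq]
      constructor
      · push_cast; ring
      · trivial

-- A's loop from a populated state: final min and first index of the min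
theorem loopA (num : Int) (t : List Int) (s j m : Int) :
    ((PySem.List.enumerate t s).foldl
      (fun (st : Option Int × Option Int) p =>
        match st.2 with
        | none => (some p.1, some |p.2 - num|)
        | some m => if |p.2 - num| < m then (some p.1, some |p.2 - num|) else st)
      (some j, some m)) =
    ((if (t.map (fun l => |l - num|)).foldl min m < m
       then some (s + (((t.map (fun l => |l - num|)).idxOf ((t.map (fun l => |l - num|)).foldl min m) : Nat) : Int))
       else some j), some ((t.map (fun l => |l - num|)).foldl min m)) := by
  induction t generalizing s j m with
  | nil => simp
  | cons x t ih =>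
    rw [PySem.List.enumerate_cons]
    simp only [List.foldl_cons, List.map_cons]
    by_cases h : |x - num| < m
    · rw [if_pos h, ih]
      have hM : List.foldl min (min m |x - num|) (t.map (fun l => |l - num|))
          = List.foldl min |x - num| (t.map (fun l => |l - num|)) := by
        rw [foldl_min_min, min_eq_right (le_of_lt (lt_of_le_of_lt (foldl_min_le _) h))]
      rw [hM]
      have hle : List.foldl min |x - num| (t.map (fun l => |l - num|)) ≤ |x - num| :=
        foldl_min_le _
      have hMm : List.foldl min |x - num| (t.map (fun l => |l - num|)) < m :=
        lt_of_le_of_lt hle h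
      rw [if_pos hMm]
      by_cases h2 : List.foldl min |x - num| (t.map (fun l => |l - num|)) < |x - num|
      · have hne : ¬ (|x - num| = List.foldl min |x - num| (t.map (fun l => |l - num|))) := by
          omega
        rw [if_pos h2]
        simp only [List.idxOf_cons, cond_eq_ite, beq_iff_eq, hne, if_false, Prod.mk.injEq, Option.some.injEq]
        constructor
        · push_cast; linarith
        · trivial
      · have hMe : List.foldl min |x - num| (t.map (fun l => |l - num|)) = |x - num| :=
          le_antisymm hle (not_lt.mp h2)
        rw [if_neg h2]
        simp [hMe]
    · rw [if_neg h, ih]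
      have hM : List.foldl min (min m |x - num|) (t.map (fun l => |l - num|))
          = List.foldl min m (t.map (fun l => |l - num|)) := by
        rw [min_eq_left (not_lt.mp h)]
      rw [hM]
      by_cases h2 : List.foldl min m (t.map (fun l => |l - num|)) < m
      · have hne : ¬ (|x - num| = List.foldl min m (t.map (fun l => |l - num|))) := by
          have := not_lt.mp h; omega
        rw [if_pos h2, if_pos h2]
        simp only [List.idxOf_cons, cond_eq_ite, beq_iff_eq, hne, if_false, Prod.mk.injEq, Option.some.injEq]
        constructor
        · push_cast; linarith
        · trivial
      · rw [if_neg h2, if_neg h2]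

-- A on a nonempty list returns the first index of the minimal difference
theorem A_char (num x : Int) (t : List Int) :
    get_nearest_index (x :: t) num =
      some ((((x :: t).map (fun l => |l - num|)).idxOf (mdiff num (x :: t)) : Nat) : Int) := by
  unfold get_nearest_index
  rw [PySem.List.enumerate_cons]
  simp only [List.foldl_cons]
  rw [loopA]
  have hle : List.foldl min |x - num| (t.map (fun l => |l - num|)) ≤ |x - num| :=
    foldl_min_le _
  by_cases h2 : List.foldl min |x - num| (t.map (fun l => |l - num|)) < |x - num|
  · have hne : ¬ (|x - num| = List.foldl min |x - num| (t.map (fun l => |l - num|))) := by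
      omega
    rw [if_pos h2]
    simp [mdiff, hne]
    omega
  · have hMe : List.foldl min |x - num| (t.map (fun l => |l - num|)) = |x - num| :=
      le_antisymm hle (not_lt.mp h2)
    rw [if_neg h2]
    simp [mdiff, hMe]

-- ===== VERDICT (by name: the statement is the Claim_ definition above) =====
theorem get_nearest_index_spec : Claim_equal_get_nearest_index := by
  intro L num _
  unfold Spec_get_nearest_index get_nearest_index_alt
  cases L with
  | nil => simp [get_nearest_index, PySem.List.enumerate]
  | cons x t =>
    rw [A_char, if_neg (by simp), pyBest_char num (x :: t) (by simp)]
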